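-- pv_equiv track=rewrite | github.com/gargajit/dsa_problems | intermediate/special_idx.py | solve
-- ===== SOURCE A (Python) =====
-- def solve(A):
--     N = len(A)
--     Ps_odd = [0] * N
--     Ps_even = [0] * N
--
--     Ps_odd[0] = 0
--     Ps_even[0] = A[0]
--
--     # Odd indexed Prefix Sum
--     for i in range(1,N):
--         if i % 2 == 1:
--             Ps_odd[i] = Ps_odd[i-1] + A[i]
--         else:
--             Ps_odd[i] = Ps_odd[i-1]
--
--     # Even indexed Prefix Sum
--     for i in range(1, N):
--         if i % 2 == 0:
--             Ps_even[i] = Ps_even[i-1] + A[i]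
--         else:
--             Ps_even[i] = Ps_even[i-1]
--
--
--     cnt = 0
--     if ((Ps_even[N-1] - Ps_even[N-1]) == (Ps_odd[N-1] - Ps_odd[0])):
--         cnt += 1
--
--     for i in range(1, N):
--         if ((Ps_odd[i-1] + Ps_even[N-1] - Ps_even[i]) == (Ps_even[i-1] + Ps_odd[N-1] - Ps_odd[i])):
--             cnt += 1
--
--     return cnt
-- ===== SOURCE B (Python) =====
-- def solve(A):
--     right_odd = 0
--     right_even = 0
--     for i, x in enumerate(A):
--         if i % 2:
--             right_odd += x
--         else:
--             right_even += x
--     left_odd = 0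
--     left_even = 0
--     cnt = 0
--     for i, x in enumerate(A):
--         if i % 2:
--             right_odd -= x
--         else:
--             right_even -= x
--         if left_even + right_odd == left_odd + right_even:
--             cnt += 1
--         if i % 2:
--             left_odd += x
--         else:
--             left_even += x
--     return cnt
-- ===== Notes on version B (the rewrite author's own statement) =====
-- stated objective: simpler
-- what changed: Replaces the two materialized prefix-sum arrays and the separate hard-coded i=0 check by a single accumulator sweep over enumerate(A) maintaining four scalars (left/right odd/even sums), treating index 0 by the same balance formula as every other index.
-- intended difference: On nonempty A where (sum of odd-indexed elements == 0) disagrees with the correct index-0 removal condition (odd sum == even sum minus the first element), A's first check subtracts the final even prefix sum from itself (an evident typo for the general balance formula, yielding the degenerate test odd-sum == 0), so A mis-counts index 0 by one; B applies the uniform balance condition there, which is the intended value. — e.g. on solve([0, 0, 1]): A returns 2, B returns 1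
import Mathlib
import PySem

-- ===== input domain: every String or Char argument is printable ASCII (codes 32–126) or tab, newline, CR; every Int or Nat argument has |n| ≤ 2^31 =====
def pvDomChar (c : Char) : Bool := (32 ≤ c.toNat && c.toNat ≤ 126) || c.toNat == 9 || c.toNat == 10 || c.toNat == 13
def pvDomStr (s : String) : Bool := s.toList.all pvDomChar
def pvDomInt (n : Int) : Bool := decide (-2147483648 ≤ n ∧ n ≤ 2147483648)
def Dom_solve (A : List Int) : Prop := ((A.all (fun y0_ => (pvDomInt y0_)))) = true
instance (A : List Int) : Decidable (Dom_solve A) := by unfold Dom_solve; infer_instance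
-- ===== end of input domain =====

-- B replaces A's two materialized prefix-sum arrays (and A's degenerate hard-coded i=0 check) by one
-- accumulator sweep keeping four scalar sums, applying the same balance condition at every index (simpler).

-- ===== PORT A =====
def solve (A : List Int) : Int :=
  let N : Int := A.length
  -- Ps_odd[0] = 0 / Ps_even[0] = A[0]: IndexError on empty A (excluded by Pre_solve); getD default unreached there
  let psOdd0 : List Int := PySem.List.pySetD (List.replicate N.toNat 0) 0 0
  let psEven0 : List Int := PySem.List.pySetD (List.replicate N.toNat 0) 0 (PySem.List.pyGetD A 0 0)
  let psOdd := (PySem.List.pyRange 1 N 1).foldl (fun ps i =>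
      if PySem.Int.mod i 2 = 1 then
        PySem.List.pySetD ps i (PySem.List.pyGetD ps (i-1) 0 + PySem.List.pyGetD A i 0)
      else
        PySem.List.pySetD ps i (PySem.List.pyGetD ps (i-1) 0)) psOdd0
  let psEven := (PySem.List.pyRange 1 N 1).foldl (fun ps i =>
      if PySem.Int.mod i 2 = 0 then
        PySem.List.pySetD ps i (PySem.List.pyGetD ps (i-1) 0 + PySem.List.pyGetD A i 0)
      else
        PySem.List.pySetD ps i (PySem.List.pyGetD ps (i-1) 0)) psEven0
  let cnt : Int :=
    if PySem.List.pyGetD psEven (N-1) 0 - PySem.List.pyGetD psEven (N-1) 0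
       = PySem.List.pyGetD psOdd (N-1) 0 - PySem.List.pyGetD psOdd 0 0 then 1 else 0
  (PySem.List.pyRange 1 N 1).foldl (fun cnt i =>
      if PySem.List.pyGetD psOdd (i-1) 0 + PySem.List.pyGetD psEven (N-1) 0 - PySem.List.pyGetD psEven i 0
         = PySem.List.pyGetD psEven (i-1) 0 + PySem.List.pyGetD psOdd (N-1) 0 - PySem.List.pyGetD psOdd i 0
      then cnt + 1 else cnt) cnt

-- ===== PORT B =====
def solve_alt (A : List Int) : Int :=
  let t : Int × Int := (PySem.List.enumerate A 0).foldl (fun (t : Int × Int) p =>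
      if PySem.Int.mod p.1 2 ≠ 0 then (t.1 + p.2, t.2) else (t.1, t.2 + p.2)) (0, 0)
  let r := (PySem.List.enumerate A 0).foldl (fun (s : Int × Int × Int × Int × Int) p =>
      let ro := if PySem.Int.mod p.1 2 ≠ 0 then s.1 - p.2 else s.1
      let re := if PySem.Int.mod p.1 2 ≠ 0 then s.2.1 else s.2.1 - p.2
      let cnt := if s.2.2.2.1 + ro = s.2.2.1 + re then s.2.2.2.2 + 1 else s.2.2.2.2
      let lo := if PySem.Int.mod p.1 2 ≠ 0 then s.2.2.1 + p.2 else s.2.2.1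
      let le := if PySem.Int.mod p.1 2 ≠ 0 then s.2.2.2.1 else s.2.2.2.1 + p.2
      (ro, re, lo, le, cnt)) (t.1, t.2, 0, 0, 0)
  r.2.2.2.2

-- ===== PRECONDITION & SPEC =====
-- sum of the odd-indexed (resp. even-indexed) elements among the first n of A (spec helpers; used by D_)
def pvLO (A : List Int) : Nat → Int
  | 0 => 0
  | n+1 => pvLO A n + (if n % 2 = 1 then A.getD n 0 else 0)
def pvLE (A : List Int) : Nat → Int
  | 0 => 0
  | n+1 => pvLE A n + (if n % 2 = 0 then A.getD n 0 else 0)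

-- Pre_ excludes only the empty list, on which A raises IndexError on its first-element access
def Pre_solve (A : List Int) : Prop := A ≠ []
instance (A : List Int) : Decidable (Pre_solve A) := by unfold Pre_solve; infer_instance
def pvWitness_solve : List Int := [1, 2]

-- On nonempty A where (sum of odd-indexed elements == 0) disagrees with the correct index-0 removal
-- condition (odd sum == even sum minus the first element), A's first check subtracts the final even
-- prefix sum from itself (an evident typo for the general balance formula, yielding the degenerate
-- test odd-sum == 0), so A mis-counts index 0 by one; B applies the uniform balance condition there,
-- which is the intended value.
def D_solve (A : List Int) : Prop :=
  A ≠ [] ∧ ¬((pvLO A A.length = 0) ↔ (pvLO A A.length = pvLE A A.length - A.getD 0 0))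
instance (A : List Int) : Decidable (D_solve A) := by unfold D_solve; infer_instance

def Spec_solve (A : List Int) (out : Int) : Prop := ¬ D_solve A → out = solve_alt A
instance (A : List Int) (out : Int) : Decidable (Spec_solve A out) := by unfold Spec_solve; infer_instance

def pvDiffWitness_solve : List Int := [0, 0, 1]
def pvDiffWitnessOut_solve : Int × Int := (2, 1)

-- ===== CLAIM (what is proved, stated in full; the proofs are below) =====
def Claim_unchanged_solve : Prop := ∀ (A : List Int), Dom_solve A → Pre_solve A → Spec_solve A (solve A)
def Claim_changed_solve : Prop := Dom_solve (pvDiffWitness_solve) ∧ Pre_solve (pvDiffWitness_solve) ∧ D_solve (pvDiffWitness_solve) ∧ solve (pvDiffWitness_solve) = pvDiffWitnessOut_solve.1 ∧ solve_alt (pvDiffWitness_solve) = pvDiffWitnessOut_solve.2 ∧ pvDiffWitnessOut_solve.1 ≠ pvDiffWitnessOut_solve.2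
def Claim_exact_solve : Prop := ∀ (A : List Int), Dom_solve A → Pre_solve A → D_solve A → solve A ≠ solve_alt A

-- ===== LEMMAS AND PROOFS =====

-- the uniform balance condition at index i (B's condition; equals A's loop condition for 1 <= i)
def pvCond (A : List Int) (i : Int) : Bool :=
  decide (pvLE A i.toNat + (pvLO A A.length - pvLO A (i.toNat+1))
        = pvLO A i.toNat + (pvLE A A.length - pvLE A (i.toNat+1)))

theorem pv_count_shift (p : Int → Bool) (l : List Int) (c : Int) :
    l.foldl (fun acc i => if p i then acc + 1 else acc) c
    = c + l.foldl (fun acc i => if p i then acc + 1 else acc) 0 := by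
  induction l generalizing c with
  | nil => simp
  | cons x xs ih =>
    simp only [List.foldl_cons]
    rw [ih, ih (if p x then 0 + 1 else 0)]
    by_cases h : p x <;> simp [h] <;> ring

theorem pv_mod_ne (k : Nat) : (PySem.Int.mod (k : Int) 2 ≠ 0) ↔ k % 2 = 1 := by
  rw [PySem.Int.mod_eq_emod_of_pos (by omega : (0:Int) < 2)]
  omega

theorem pv_totals (A : List Int) : ∀ (n k : Nat), A.length - k = n → k ≤ A.length →
    (PySem.List.enumerate (A.drop k) (k : Int)).foldl (fun (t : Int × Int) p =>
      if PySem.Int.mod p.1 2 ≠ 0 then (t.1 + p.2, t.2) else (t.1, t.2 + p.2))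
      (pvLO A k, pvLE A k)
    = (pvLO A A.length, pvLE A A.length) := by
  intro n
  induction n with
  | zero =>
    intro k hn hk
    have : k = A.length := by omega
    subst this
    simp [List.drop_of_length_le, PySem.List.enumerate]
  | succ m ih =>
    intro k hn hk
    have hlt : k < A.length := by omega
    rw [← List.getElem_cons_drop hlt, PySem.List.enumerate_cons, List.foldl_cons]
    have hg : A[k] = A.getD k 0 := (List.getD_eq_getElem A 0 hlt).symm
    have hstep : (if PySem.Int.mod (k : Int) 2 ≠ 0
        then (pvLO A k + A[k], pvLE A k) else (pvLO A k, pvLE A k + A[k]))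
        = (pvLO A (k+1), pvLE A (k+1)) := by
      by_cases hp : k % 2 = 1
      · rw [if_pos ((pv_mod_ne k).2 hp)]
        simp [pvLO, pvLE, hp, hg, Nat.mod_two_ne_zero.2 hp]
      · rw [if_neg (fun h => hp ((pv_mod_ne k).1 h))]
        have hp0 : k % 2 = 0 := by omega
        simp [pvLO, pvLE, hp0, hg]
    rw [hstep]
    have : ((k : Int) + 1) = ((k + 1 : Nat) : Int) := by push_cast; ring
    rw [this]
    exact ih (k+1) (by omega) (by omega)

theorem pv_loopB (A : List Int) : ∀ (n k : Nat), A.length - k = n → ∀ (c : Int),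
    ((PySem.List.enumerate (A.drop k) (k : Int)).foldl (fun (s : Int × Int × Int × Int × Int) p =>
      let ro := if PySem.Int.mod p.1 2 ≠ 0 then s.1 - p.2 else s.1
      let re := if PySem.Int.mod p.1 2 ≠ 0 then s.2.1 else s.2.1 - p.2
      let cnt := if s.2.2.2.1 + ro = s.2.2.1 + re then s.2.2.2.2 + 1 else s.2.2.2.2
      let lo := if PySem.Int.mod p.1 2 ≠ 0 then s.2.2.1 + p.2 else s.2.2.1
      let le := if PySem.Int.mod p.1 2 ≠ 0 then s.2.2.2.1 else s.2.2.2.1 + p.2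
      (ro, re, lo, le, cnt))
      (pvLO A A.length - pvLO A k, pvLE A A.length - pvLE A k, pvLO A k, pvLE A k, c)).2.2.2.2
    = c + (PySem.List.pyRange (k : Int) (A.length : Int) 1).foldl
        (fun acc i => if pvCond A i then acc + 1 else acc) 0 := by
  intro n
  induction n with
  | zero =>
    intro k hn c
    rw [List.drop_of_length_le (by omega), PySem.List.pyRange_one_eq_nil (by push_cast; omega)]
    simp [PySem.List.enumerate]
  | succ m ih =>
    intro k hn c
    have hlt : k < A.length := by omega
    have hg : A[k] = A.getD k 0 := (List.getD_eq_getElem A 0 hlt).symm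
    rw [← List.getElem_cons_drop hlt, PySem.List.enumerate_cons, List.foldl_cons]
    have hcnd : ∀ ro re : Int, (pvLE A k + ro = pvLO A k + re
        ∧ ro = pvLO A A.length - pvLO A (k+1) ∧ re = pvLE A A.length - pvLE A (k+1))
        → pvCond A (k : Int) = true := by
      intro ro re ⟨h1, h2, h3⟩
      simp only [pvCond, Int.toNat_natCast, decide_eq_true_eq]
      omega
    have hcnd' : ∀ ro re : Int, (pvCond A (k : Int) = true
        ∧ ro = pvLO A A.length - pvLO A (k+1) ∧ re = pvLE A A.length - pvLE A (k+1))
        → pvLE A k + ro = pvLO A k + re := by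
      intro ro re ⟨h1, h2, h3⟩
      simp only [pvCond, Int.toNat_natCast, decide_eq_true_eq] at h1
      omega
    have hstate : ∀ c : Int, ((fun (s : Int × Int × Int × Int × Int) (p : Int × Int) =>
        let ro := if PySem.Int.mod p.1 2 ≠ 0 then s.1 - p.2 else s.1
        let re := if PySem.Int.mod p.1 2 ≠ 0 then s.2.1 else s.2.1 - p.2
        let cnt := if s.2.2.2.1 + ro = s.2.2.1 + re then s.2.2.2.2 + 1 else s.2.2.2.2
        let lo := if PySem.Int.mod p.1 2 ≠ 0 then s.2.2.1 + p.2 else s.2.2.1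
        let le := if PySem.Int.mod p.1 2 ≠ 0 then s.2.2.2.1 else s.2.2.2.1 + p.2
        (ro, re, lo, le, cnt))
          (pvLO A A.length - pvLO A k, pvLE A A.length - pvLE A k, pvLO A k, pvLE A k, c)
          ((k : Int), A[k]))
        = (pvLO A A.length - pvLO A (k+1), pvLE A A.length - pvLE A (k+1),
           pvLO A (k+1), pvLE A (k+1), if pvCond A (k : Int) then c + 1 else c) := by
      intro c
      by_cases hp : k % 2 = 1
      · have hm : PySem.Int.mod (k : Int) 2 ≠ 0 := (pv_mod_ne k).2 hp
        have hLO : pvLO A (k+1) = pvLO A k + A[k] := by simp [pvLO, hp, hg]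
        have hLE : pvLE A (k+1) = pvLE A k := by simp [pvLE, hp]
        simp only [if_pos hm]
        by_cases hc : pvLE A k + (pvLO A A.length - pvLO A k - A[k])
            = pvLO A k + (pvLE A A.length - pvLE A k)
        · rw [if_pos hc, if_pos (hcnd _ _ ⟨hc, by omega, by omega⟩)]
          simp only [Prod.mk.injEq]
          refine ⟨by omega, by omega, by omega, by omega, trivial⟩
        · rw [if_neg hc, if_neg (fun h => hc (by have := hcnd' _ _ ⟨h, rfl, rfl⟩; omega))]
          simp only [Prod.mk.injEq]
          refine ⟨by omega, by omega, by omega, by omega, trivial⟩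
      · have hp0 : k % 2 = 0 := by omega
        have hm : ¬ PySem.Int.mod (k : Int) 2 ≠ 0 := fun h => hp ((pv_mod_ne k).1 h)
        have hLO : pvLO A (k+1) = pvLO A k := by simp [pvLO, hp0]
        have hLE : pvLE A (k+1) = pvLE A k + A[k] := by simp [pvLE, hp0, hg]
        simp only [if_neg hm]
        by_cases hc : pvLE A k + (pvLO A A.length - pvLO A k)
            = pvLO A k + (pvLE A A.length - pvLE A k - A[k])
        · rw [if_pos hc, if_pos (hcnd _ _ ⟨hc, by omega, by omega⟩)]
          simp only [Prod.mk.injEq]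
          refine ⟨by omega, by omega, by omega, by omega, trivial⟩
        · rw [if_neg hc, if_neg (fun h => hc (by have := hcnd' _ _ ⟨h, rfl, rfl⟩; omega))]
          simp only [Prod.mk.injEq]
          refine ⟨by omega, by omega, by omega, by omega, trivial⟩
    simp only [hstate c]
    have hcast : ((k : Int) + 1) = ((k + 1 : Nat) : Int) := by push_cast; ring
    rw [hcast, ih (k+1) (by omega)]
    rw [PySem.List.pyRange_one_cons (by push_cast; omega : (k : Int) < (A.length : Int)), List.foldl_cons,
        pv_count_shift, hcast]
    by_cases h : pvCond A (k : Int) = true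
    · simp only [if_pos h]
      rw [pv_count_shift _ _ (0+1)]
      omega
    · simp only [if_neg h]; omega

theorem pv_build_inv (g : List Int → Int → List Int) (d v : Int → Int) (N : Int)
    (hg : ∀ ps i, 1 ≤ i → g ps i = PySem.List.pySetD ps i (PySem.List.pyGetD ps (i-1) 0 + d i))
    (hv : ∀ i : Int, 1 ≤ i → v i = v (i-1) + d i) :
    ∀ (n : Nat) (k : Int) (ps : List Int), (N - k).toNat = n → 1 ≤ k → k ≤ N →
      ps.length = N.toNat → (∀ j : Int, 0 ≤ j → j < k → PySem.List.pyGetD ps j 0 = v j) →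
      ∀ j : Int, 0 ≤ j → j < N →
        PySem.List.pyGetD ((PySem.List.pyRange k N 1).foldl g ps) j 0 = v j := by
  intro n
  induction n with
  | zero =>
    intro k ps hn hk hkN hlen hps j hj hjN
    have hNk : N ≤ k := by omega
    rw [PySem.List.pyRange_one_eq_nil hNk]
    exact List.foldl_nil ▸ hps j hj (by omega)
  | succ m ih =>
    intro k ps hn hk hkN hlen hps j hj hjN
    have hkN' : k < N := by omega
    rw [PySem.List.pyRange_one_cons hkN', List.foldl_cons]
    have hstep : g ps k = ps.set k.toNat (v k) := by
      rw [hg ps k hk, hps (k-1) (by omega) (by omega), ← hv k hk,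
          PySem.List.pySetD_of_nonneg _ _ (by omega)]
    rw [hstep]
    refine ih (k+1) _ (by omega) (by omega) (by omega) (by simpa using hlen) ?_ j hj hjN
    intro j' hj' hj'k
    have hjlen : j'.toNat < ps.length := by omega
    rw [PySem.List.pyGetD_of_nonneg _ _ hj']
    by_cases hje : j' = k
    · subst hje
      simp [List.getD_eq_getElem?_getD, List.getElem?_set_self, hjlen]
    · have hset : (ps.set k.toNat (v k)).getD j'.toNat 0 = ps.getD j'.toNat 0 := by
        simp [List.getD_eq_getElem?_getD, List.getElem?_set_ne (by omega : k.toNat ≠ j'.toNat)]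
      rw [hset, ← PySem.List.pyGetD_of_nonneg _ _ hj']
      exact hps j' hj' (by omega)

theorem solve_eq (A : List Int) (hA : A ≠ []) :
    solve A = (if pvLO A A.length = 0 then 1 else 0)
      + (PySem.List.pyRange 1 (A.length : Int) 1).foldl
          (fun c i => if pvCond A i then c + 1 else c) 0 := by
  have hN1 : 1 ≤ (A.length : Int) := by
    have : A.length ≠ 0 := fun h => hA (List.eq_nil_of_length_eq_zero h)
    omega
  have hlen0 : (PySem.List.pySetD (List.replicate ((A.length : Int)).toNat 0) 0 (0:Int)).length
      = ((A.length : Int)).toNat := by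
    rw [PySem.List.pySetD_of_nonneg _ _ (by omega)]
    simp
  have hlen0' : (PySem.List.pySetD (List.replicate ((A.length : Int)).toNat 0) 0
      (PySem.List.pyGetD A 0 0)).length = ((A.length : Int)).toNat := by
    rw [PySem.List.pySetD_of_nonneg _ _ (by omega)]
    simp
  have hOdd := pv_build_inv
    (fun ps i =>
      if PySem.Int.mod i 2 = 1 then
        PySem.List.pySetD ps i (PySem.List.pyGetD ps (i-1) 0 + PySem.List.pyGetD A i 0)
      else
        PySem.List.pySetD ps i (PySem.List.pyGetD ps (i-1) 0))
    (fun i => if PySem.Int.mod i 2 = 1 then PySem.List.pyGetD A i 0 else 0)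
    (fun i => pvLO A (i.toNat + 1)) (A.length)
    (by
      intro ps i hi
      by_cases h : PySem.Int.mod i 2 = 1
      · simp only [if_pos h]
      · simp only [if_neg h, add_zero])
    (by
      intro i hi
      dsimp only
      have hm : PySem.Int.mod i 2 = i % 2 := PySem.Int.mod_eq_emod_of_pos (by omega : (0:Int) < 2)
      have ht : (i-1).toNat + 1 = i.toNat := by omega
      rw [ht]
      conv_lhs => rw [pvLO]
      by_cases h : i % 2 = 1
      · have h2 : i.toNat % 2 = 1 := by omega
        rw [if_pos (hm.trans h), if_pos h2, PySem.List.pyGetD_of_nonneg _ _ (by omega : (0:Int) ≤ i)]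
      · have h2 : ¬ i.toNat % 2 = 1 := by omega
        rw [if_neg h2, if_neg (show ¬ PySem.Int.mod i 2 = 1 from fun hx => h (hm ▸ hx)), add_zero]
        )
    ((A.length : Int) - 1).toNat 1
    (PySem.List.pySetD (List.replicate ((A.length : Int)).toNat 0) 0 0)
    rfl (by omega) hN1 hlen0
    (by
      intro j hj hj1
      have hj0 : j = 0 := by omega
      subst hj0
      rw [PySem.List.pySetD_of_nonneg _ _ (by omega), PySem.List.pyGetD_of_nonneg _ _ (by omega)]
      have : (0:Int).toNat < (List.replicate ((A.length : Int)).toNat (0:Int)).length := by simp; omega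
      simp only [List.getD_eq_getElem?_getD, List.getElem?_set_self (by simpa using this)]
      simp [pvLO])
  have hEven := pv_build_inv
    (fun ps i =>
      if PySem.Int.mod i 2 = 0 then
        PySem.List.pySetD ps i (PySem.List.pyGetD ps (i-1) 0 + PySem.List.pyGetD A i 0)
      else
        PySem.List.pySetD ps i (PySem.List.pyGetD ps (i-1) 0))
    (fun i => if PySem.Int.mod i 2 = 0 then PySem.List.pyGetD A i 0 else 0)
    (fun i => pvLE A (i.toNat + 1)) (A.length)
    (by
      intro ps i hi
      by_cases h : PySem.Int.mod i 2 = 0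
      · simp only [if_pos h]
      · simp only [if_neg h, add_zero])
    (by
      intro i hi
      dsimp only
      have hm : PySem.Int.mod i 2 = i % 2 := PySem.Int.mod_eq_emod_of_pos (by omega : (0:Int) < 2)
      have ht : (i-1).toNat + 1 = i.toNat := by omega
      rw [ht]
      conv_lhs => rw [pvLE]
      by_cases h : i % 2 = 0
      · have h2 : i.toNat % 2 = 0 := by omega
        rw [if_pos (hm.trans h), if_pos h2, PySem.List.pyGetD_of_nonneg _ _ (by omega : (0:Int) ≤ i)]
      · have h2 : ¬ i.toNat % 2 = 0 := by omega
        rw [if_neg h2, if_neg (show ¬ PySem.Int.mod i 2 = 0 from fun hx => h (hm ▸ hx)), add_zero]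
        )
    ((A.length : Int) - 1).toNat 1
    (PySem.List.pySetD (List.replicate ((A.length : Int)).toNat 0) 0 (PySem.List.pyGetD A 0 0))
    rfl (by omega) hN1 hlen0'
    (by
      intro j hj hj1
      have hj0 : j = 0 := by omega
      subst hj0
      rw [PySem.List.pySetD_of_nonneg _ _ (by omega), PySem.List.pyGetD_of_nonneg _ _ (by omega)]
      have : (0:Int).toNat < (List.replicate ((A.length : Int)).toNat (0:Int)).length := by simp; omega
      simp only [List.getD_eq_getElem?_getD, List.getElem?_set_self (by simpa using this)]
      have hlt : 0 < A.length := by omega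
      simp [pvLE, PySem.List.pyGetD_of_nonneg _ _ (le_refl (0:Int)), hlt])
  simp only [solve]
  rw [PySem.List.foldl_congr_mem _ _
      (fun c i => if pvCond A i then c + 1 else c) _ ?_]
  · rw [pv_count_shift]
    have e2 : (((A.length : Int))-1).toNat + 1 = A.length := by omega
    have h01 : pvLO A ((0:Int).toNat + 1) = 0 := by simp [pvLO]
    simp only [hEven ((A.length : Int) - 1) (by omega) (by omega),
        hOdd ((A.length : Int) - 1) (by omega) (by omega),
        hOdd 0 (by omega) (by omega), e2, h01]
    have hiff : (pvLE A A.length - pvLE A A.length = pvLO A A.length - 0)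
        ↔ (pvLO A A.length = 0) := by constructor <;> (intro hh; omega)
    simp only [hiff]
  · intro acc x hx
    obtain ⟨hx1, hx2⟩ := PySem.List.mem_pyRange_one.1 hx
    have e1 : (x-1).toNat + 1 = x.toNat := by omega
    have e2 : (((A.length : Int))-1).toNat + 1 = A.length := by omega
    simp only [hOdd (x-1) (by omega) (by omega),
        hEven ((A.length : Int) - 1) (by omega) (by omega),
        hEven x (by omega) (by omega), hEven (x-1) (by omega) (by omega),
        hOdd ((A.length : Int) - 1) (by omega) (by omega),
        hOdd x (by omega) (by omega), e1, e2]
    have hiff : (pvLO A x.toNat + pvLE A A.length - pvLE A (x.toNat+1)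
        = pvLE A x.toNat + pvLO A A.length - pvLO A (x.toNat+1)) ↔ (pvCond A x = true) := by
      simp only [pvCond, decide_eq_true_eq]
      constructor <;> (intro hh; omega)
    simp only [hiff]

theorem solve_alt_eq (A : List Int) :
    solve_alt A = (PySem.List.pyRange 0 (A.length : Int) 1).foldl
        (fun c i => if pvCond A i then c + 1 else c) 0 := by
  simp only [solve_alt]
  have ht := pv_totals A A.length 0 rfl (Nat.zero_le _)
  have hl := pv_loopB A A.length 0 rfl 0
  simp only [List.drop_zero, Nat.cast_zero, sub_zero] at ht hl
  have h0o : pvLO A 0 = 0 := rfl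
  have h0e : pvLE A 0 = 0 := rfl
  rw [h0o, h0e] at ht hl
  simp only [sub_zero] at hl
  rw [ht]
  rw [hl]
  omega

theorem cond_zero (A : List Int) :
    pvCond A 0 = true ↔ (pvLO A A.length = pvLE A A.length - A.getD 0 0) := by
  simp only [pvCond, Int.toNat_zero, zero_add, decide_eq_true_eq]
  have h1 : pvLO A 1 = 0 := by simp [pvLO]
  have h2 : pvLE A 1 = A.getD 0 0 := by simp [pvLE]
  have h3 : pvLO A 0 = 0 := by simp [pvLO]
  have h4 : pvLE A 0 = 0 := by simp [pvLE]
  rw [h1, h2, h3, h4]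
  constructor <;> (intro h; omega)

theorem main_split (A : List Int) (hA : A ≠ []) :
    solve A = (if pvLO A A.length = 0 then 1 else 0)
      + ((PySem.List.pyRange 1 (A.length : Int) 1).foldl
          (fun c i => if pvCond A i then c + 1 else c) 0)
    ∧ solve_alt A = (if pvLO A A.length = pvLE A A.length - A.getD 0 0 then 1 else 0)
      + ((PySem.List.pyRange 1 (A.length : Int) 1).foldl
          (fun c i => if pvCond A i then c + 1 else c) 0) := by
  refine ⟨solve_eq A hA, ?_⟩
  have hN : (0 : Int) < A.length := by
    have : A.length ≠ 0 := fun h => hA (List.eq_nil_of_length_eq_zero h)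
    omega
  rw [solve_alt_eq, PySem.List.pyRange_one_cons hN, List.foldl_cons, pv_count_shift]
  have hrg : PySem.List.pyRange ((0:Int) + 1) (A.length : Int) 1
      = PySem.List.pyRange 1 (A.length : Int) 1 := by norm_num
  rw [hrg]
  by_cases h0 : pvCond A 0 = true
  · rw [if_pos ((cond_zero A).1 h0)]
    simp only [if_pos h0]
    omega
  · rw [if_neg (fun h => h0 ((cond_zero A).2 h))]
    simp only [if_neg h0]


-- ===== VERDICT (by name: the statement is the Claim_ definition above) =====
theorem solve_spec : Claim_unchanged_solve := by
  intro A _ hPre hD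
  obtain ⟨h1, h2⟩ := main_split A hPre
  rw [h1, h2]
  have hiff : (pvLO A A.length = 0) ↔ (pvLO A A.length = pvLE A A.length - A.getD 0 0) := by
    by_contra h
    exact hD ⟨hPre, h⟩
  by_cases hz : pvLO A A.length = 0
  · rw [if_pos hz, if_pos (hiff.1 hz)]
  · rw [if_neg hz, if_neg (fun h => hz (hiff.2 h))]

theorem solve_changed : Claim_changed_solve := by unfold Claim_changed_solve; decide

theorem solve_tight : Claim_exact_solve := by
  intro A _ hPre hD
  obtain ⟨h1, h2⟩ := main_split A hPre
  rw [h1, h2]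
  rcases hD with ⟨_, hne⟩
  by_cases hz : pvLO A A.length = 0
  · have hn : ¬ (pvLO A A.length = pvLE A A.length - A.getD 0 0) :=
      fun h => hne ⟨fun _ => h, fun _ => hz⟩
    rw [if_pos hz, if_neg hn]
    omega
  · have hy : pvLO A A.length = pvLE A A.length - A.getD 0 0 := by
      by_contra h
      exact hne ⟨fun h' => absurd h' hz, fun h' => absurd h' h⟩
    rw [if_neg hz, if_pos hy]
    omega
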